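-- pv_equiv track=rewrite | github.com/Programming-Sai/daily-solves | A2SV-Contest-Round-8/C_Long_Long.py | check
-- ===== SOURCE A (Python) =====
-- def check(n, a):
--     running_sum = r = count = 0
--     for x in a:
--         running_sum += (x if x >= 0 else -x)
--
--     while r < n:
--         met_neg = False
--         while r < n and a[r] <= 0:
--             # printx(r, a[r])
--             met_neg = met_neg or (a[r] < 0)
--             r += 1
--         count += met_neg
--         r += 1
--     return (running_sum, count)
-- ===== SOURCE B (Python) =====
-- def check(n, a):
--     total = sum(abs(x) for x in a)
--     count = 0
--     seen_neg = False  # a negative already counted inside the current nonpositive run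
--     for i in range(n):
--         x = a[i]
--         if x > 0:
--             seen_neg = False
--         elif x < 0 and not seen_neg:
--             count += 1
--             seen_neg = True
--     return (total, count)
-- ===== Notes on version B (the rewrite author's own statement) =====
-- stated objective: simpler
-- what changed: Replaces A's nested while-loops (inner loop consuming a whole nonpositive run, then a flag added to the count) by one flat for-loop over range(n) with a single seen_neg state flag that counts each run at its first negative element; the absolute sum uses abs() in a generator.
import Mathlib
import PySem

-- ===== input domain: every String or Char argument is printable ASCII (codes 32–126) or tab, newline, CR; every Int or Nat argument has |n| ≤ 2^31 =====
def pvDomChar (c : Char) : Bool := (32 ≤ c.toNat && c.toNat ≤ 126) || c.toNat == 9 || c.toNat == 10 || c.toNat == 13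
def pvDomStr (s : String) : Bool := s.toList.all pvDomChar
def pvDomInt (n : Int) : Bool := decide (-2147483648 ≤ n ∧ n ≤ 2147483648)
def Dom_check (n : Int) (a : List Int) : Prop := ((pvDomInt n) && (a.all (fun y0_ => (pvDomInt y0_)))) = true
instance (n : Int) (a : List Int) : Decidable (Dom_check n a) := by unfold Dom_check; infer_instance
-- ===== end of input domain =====

-- B replaces A's nested while-loops by one flat pass with a single state flag (objective: simpler).

-- ===== PORT A =====
-- inner while loop: 'while r < n and a[r] <= 0: met_neg = met_neg or (a[r] < 0); r += 1'
-- (a[r] via pyGet?, defaulted; Pre_check keeps every access in range)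
def checkInner (n : Int) (a : List Int) (r : Int) (met : Bool) : Int × Bool :=
  if h : r < n ∧ (PySem.List.pyGet? a r).getD 0 ≤ 0 then
    checkInner n a (r + 1) (met || decide ((PySem.List.pyGet? a r).getD 0 < 0))
  else (r, met)
termination_by (n - r).toNat
decreasing_by omega

theorem checkInner_ge (n : Int) (a : List Int) (r : Int) (met : Bool) :
    r ≤ (checkInner n a r met).1 := by
  unfold checkInner
  split
  · exact le_trans (by omega) (checkInner_ge n a (r + 1) _)
  · exact le_refl r
termination_by (n - r).toNat
decreasing_by omega

-- outer while loop: 'while r < n: … count += met_neg; r += 1'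
def checkOuter (n : Int) (a : List Int) (r : Int) (count : Int) : Int :=
  if h : r < n then
    let p := checkInner n a r false
    checkOuter n a (p.1 + 1) (count + (if p.2 then 1 else 0))
  else count
termination_by (n - r).toNat
decreasing_by
  have := checkInner_ge n a r false
  omega

def check (n : Int) (a : List Int) : Int × Int :=
  let running_sum := a.foldl (fun s x => s + (if x ≥ 0 then x else -x)) 0
  (running_sum, checkOuter n a 0 0)

-- ===== PORT B =====
def check_alt (n : Int) (a : List Int) : Int × Int :=
  let total := a.foldl (fun s x => s + |x|) 0
  let st := (PySem.List.pyRange 0 n 1).foldl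
    (fun (st : Int × Bool) i =>
      let x := (PySem.List.pyGet? a i).getD 0
      if x > 0 then (st.1, false)
      else if x < 0 ∧ st.2 = false then (st.1 + 1, true)
      else st) (0, false)
  (total, st.1)

-- ===== PRECONDITION & SPEC =====
-- Pre_check: A indexes a[r] for every r in [0, n); with n > len(a) it raises IndexError.
def Pre_check (n : Int) (a : List Int) : Prop := n ≤ (a.length : Int)
instance (n : Int) (a : List Int) : Decidable (Pre_check n a) := by unfold Pre_check; infer_instance
def pvWitness_check : Int × List Int := (3, [1, -2, 0, 4])

def Spec_check (n : Int) (a : List Int) (out : Int × Int) : Prop := out = check_alt n a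
instance (n : Int) (a : List Int) (out : Int × Int) : Decidable (Spec_check n a out) := by unfold Spec_check; infer_instance

-- ===== CLAIM (what is proved, stated in full; the proofs are below) =====
def Claim_equal_check : Prop := ∀ (n : Int) (a : List Int), Dom_check n a → Pre_check n a → Spec_check n a (check n a)

-- ===== LEMMAS AND PROOFS =====

-- abbreviation for B's loop body (proof-side only)
def bStep (a : List Int) (st : Int × Bool) (i : Int) : Int × Bool :=
  let x := (PySem.List.pyGet? a i).getD 0
  if x > 0 then (st.1, false)
  else if x < 0 ∧ st.2 = false then (st.1 + 1, true)
  else st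

-- B's fold, started at r with flag met and count c + [met], lands exactly where A's inner run ends.
theorem inner_fold (n : Int) (a : List Int) :
    ∀ (r : Int) (met : Bool) (c : Int),
      ((PySem.List.pyRange r n 1).foldl (bStep a) (c + (if met then 1 else 0), met)).1
      = ((PySem.List.pyRange ((checkInner n a r met).1 + 1) n 1).foldl (bStep a)
          (c + (if (checkInner n a r met).2 then 1 else 0), false)).1 := by
  intro r met c
  by_cases hr : r < n
  · rw [PySem.List.pyRange_one_cons hr]
    by_cases hx : (PySem.List.pyGet? a r).getD 0 ≤ 0
    · rw [checkInner]
      simp only [hr, hx, and_self, dite_true]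
      have hs : bStep a (c + (if met then 1 else 0), met) r
          = (c + (if (met || decide ((PySem.List.pyGet? a r).getD 0 < 0)) then 1 else 0),
             met || decide ((PySem.List.pyGet? a r).getD 0 < 0)) := by
        unfold bStep
        by_cases hneg : (PySem.List.pyGet? a r).getD 0 < 0
        · cases met <;> simp [hneg, not_lt.mpr (le_of_lt hneg)] <;> omega
        · have h0 : (PySem.List.pyGet? a r).getD 0 = 0 := le_antisymm hx (not_lt.mp hneg)
          cases met <;> simp [h0]
      rw [List.foldl_cons, hs]
      exact inner_fold n a (r + 1) _ c
    · -- run ends at a positive element: inner returns (r, met), B resets the flag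
      rw [checkInner]
      simp only [hr, hx, and_false, dite_false]
      have hs : bStep a (c + (if met then 1 else 0), met) r
          = (c + (if met then 1 else 0), false) := by
        unfold bStep; simp [lt_of_not_ge (fun h => hx (by omega))]
      rw [List.foldl_cons, hs]
  · rw [checkInner]
    simp only [hr, false_and, dite_false]
    rw [PySem.List.pyRange_one_eq_nil (by omega), PySem.List.pyRange_one_eq_nil (by omega)]
    simp
termination_by r met c => (n - r).toNat
decreasing_by omega

-- A's outer loop from r equals B's fold over the remaining indices.
theorem outer_fold (n : Int) (a : List Int) :
    ∀ (r : Int) (c : Int),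
      checkOuter n a r c = ((PySem.List.pyRange r n 1).foldl (bStep a) (c, false)).1 := by
  intro r c
  by_cases hr : r < n
  · rw [checkOuter]
    simp only [hr, dite_true]
    have hge := checkInner_ge n a r false
    rw [outer_fold n a ((checkInner n a r false).1 + 1) (c + (if (checkInner n a r false).2 then 1 else 0))]
    have := inner_fold n a r false c
    simpa using this.symm
  · rw [checkOuter]
    simp only [hr, dite_false]
    rw [PySem.List.pyRange_one_eq_nil (by omega)]
    simp
termination_by r c => (n - r).toNat
decreasing_by
  have := checkInner_ge n a r false
  omega

theorem abs_sum_eq (a : List Int) :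
    a.foldl (fun s x => s + (if x ≥ 0 then x else -x)) 0 = a.foldl (fun s x => s + |x|) 0 := by
  have : (fun (s x : Int) => s + (if x ≥ 0 then x else -x)) = (fun s x => s + |x|) := by
    funext s x
    by_cases h : x ≥ 0
    · simp [h, abs_of_nonneg h]
    · simp [h, abs_of_neg (lt_of_not_ge h)]
  rw [this]

-- ===== VERDICT (by name: the statement is the Claim_ definition above) =====
theorem check_spec : Claim_equal_check := by
  intro n a _ _
  unfold Spec_check check check_alt
  refine Prod.ext ?_ ?_
  · simpa using abs_sum_eq a
  · simpa [bStep] using outer_fold n a 0 0
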